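-- pv_equiv track=rewrite | github.com/internetProhozhij/tusur_course | part5/solution5.py | solution
-- ===== SOURCE A (Python) =====
-- def solution(text: str) -> bool:
--     words = text.split(sep=" ")
--     sequence_length = 0
--
--     for word in words:
--         is_valid = all(
--             element == False for element
--             in (letter.isdecimal() for letter in word)
--         )
--         if is_valid:
--             sequence_length += 1
--         else:
--             sequence_length = 0
--
--         if sequence_length == 3:
--             return True
--
--     return False
-- ===== SOURCE B (Python) =====
-- def solution(text: str) -> bool:
--     flags = [not any(ch.isdecimal() for ch in word) for word in text.split(sep=" ")]
--     return any(a and b and c for a, b, c in zip(flags, flags[1:], flags[2:]))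
-- ===== Notes on version B (the rewrite author's own statement) =====
-- stated objective: simpler
-- what changed: Replaces A's running counter with reset and early return by mapping each word to a clean-flag and testing, via zip of the flag list with its two shifts, whether any three consecutive flags are all true.
import Mathlib
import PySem

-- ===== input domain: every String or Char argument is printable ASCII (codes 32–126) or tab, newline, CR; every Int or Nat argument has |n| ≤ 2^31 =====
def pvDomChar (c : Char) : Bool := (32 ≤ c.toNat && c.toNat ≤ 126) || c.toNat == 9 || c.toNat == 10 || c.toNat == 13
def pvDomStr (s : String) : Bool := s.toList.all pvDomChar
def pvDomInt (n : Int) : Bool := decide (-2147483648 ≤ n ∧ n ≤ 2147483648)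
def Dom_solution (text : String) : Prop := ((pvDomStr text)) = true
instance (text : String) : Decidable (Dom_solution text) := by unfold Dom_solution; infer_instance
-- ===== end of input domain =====

-- B replaces A's running counter/reset loop by mapping words to clean-flags and scanning the zip of the flag list with its two shifts (simpler decomposition; return value only).


-- ===== PORT A =====
-- str.isdecimal() on a single char; exact on the printable-ASCII domain, where the decimal characters are exactly '0'..'9'
def pyIsDecimal (c : Char) : Bool := '0' ≤ c && c ≤ '9'

-- A's for-loop with its running counter and early return
def solLoop : List (List Char) → Int → Bool
  | [], _ => false
  | word :: words, n =>
    let isValid := word.all (fun letter => pyIsDecimal letter == false)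
    let n' := if isValid then n + 1 else 0
    if n' == 3 then true else solLoop words n'

def solution (text : String) : Bool :=
  solLoop (PySem.Chars.splitOn text.toList [' ']) 0

-- ===== PORT B =====
-- B: map each word to a clean-flag, then test the zip of the flag list with its two shifts (Python's zip of three lists → nested pairs)
def solution_alt (text : String) : Bool :=
  let flags := (PySem.Chars.splitOn text.toList [' ']).map (fun word => !(word.any pyIsDecimal))
  ((flags.zip (PySem.List.slice flags (some 1))).zip (PySem.List.slice flags (some 2))).any
    (fun p => p.1.1 && p.1.2 && p.2)

-- ===== PRECONDITION & SPEC =====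
def Spec_solution (text : String) (out : Bool) : Prop := out = solution_alt text
instance (text : String) (out : Bool) : Decidable (Spec_solution text out) := by unfold Spec_solution; infer_instance

-- ===== CLAIM (what is proved, stated in full; the proofs are below) =====
def Claim_equal_solution : Prop := ∀ (text : String), Dom_solution text → Spec_solution text (solution text)

-- ===== LEMMAS AND PROOFS =====

-- A's loop on the list of clean-flags
def loopF : List Bool → Int → Bool
  | [], _ => false
  | f :: fs, n =>
    let n' := if f then n + 1 else 0
    if n' == 3 then true else loopF fs n'

-- B's scan on the list of clean-flags
def run3 (fs : List Bool) : Bool :=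
  ((fs.zip (fs.drop 1)).zip (fs.drop 2)).any (fun p => p.1.1 && p.1.2 && p.2)

-- "the first k flags exist and are all true"
def pref1 : List Bool → Bool | a :: _ => a | _ => false
def pref2 : List Bool → Bool | a :: b :: _ => a && b | _ => false
def pref3 : List Bool → Bool | a :: b :: c :: _ => a && b && c | _ => false

lemma pref2_cons (a : Bool) (fs : List Bool) : pref2 (a :: fs) = (a && pref1 fs) := by
  cases fs <;> simp [pref1, pref2]

lemma pref3_cons (a : Bool) (fs : List Bool) : pref3 (a :: fs) = (a && pref2 fs) := by
  match fs with
  | [] => simp [pref2, pref3]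
  | [b] => simp [pref2, pref3]
  | b :: c :: fs => simp [pref2, pref3, Bool.and_assoc]

lemma run3_cons (a : Bool) (fs : List Bool) : run3 (a :: fs) = ((a && pref2 fs) || run3 fs) := by
  match fs with
  | [] => simp [run3, pref2]
  | [b] => simp [run3, pref2]
  | b :: c :: fs => simp [run3, pref2, Bool.and_assoc]

lemma pref3_or_run3 (fs : List Bool) : (pref3 fs || run3 fs) = run3 fs := by
  match fs with
  | [] => simp [pref3]
  | [a] => simp [pref3]
  | [a, b] => simp [pref3]
  | a :: b :: c :: fs =>
    rw [run3_cons, pref3_cons]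
    cases a <;> cases pref2 (b :: c :: fs) <;> simp

lemma pref1_or_pref2 (fs : List Bool) : (pref1 fs || pref2 fs) = pref1 fs := by
  match fs with
  | [] => simp [pref1, pref2]
  | [a] => simp [pref1, pref2]
  | a :: b :: fs => cases a <;> simp [pref1, pref2]

lemma loopF_run3 (fs : List Bool) :
    loopF fs 2 = (pref1 fs || run3 fs) ∧ loopF fs 1 = (pref2 fs || run3 fs) ∧
      loopF fs 0 = (pref3 fs || run3 fs) := by
  induction fs with
  | nil => simp [loopF, run3, pref1, pref2, pref3]
  | cons f fs ih =>
    obtain ⟨h2, h1, h0⟩ := ih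
    cases f with
    | false =>
      refine ⟨?_, ?_, ?_⟩ <;>
        simp [loopF, h0, run3_cons, pref1, pref2_cons, pref3_cons, pref3_or_run3]
    | true =>
      refine ⟨?_, ?_, ?_⟩
      · simp [loopF, pref1]
      · have lhs : loopF (true :: fs) 1 = loopF fs 2 := by simp [loopF]
        rw [lhs, h2, pref2_cons, run3_cons]
        simp only [Bool.true_and]
        rw [← Bool.or_assoc, pref1_or_pref2]
      · have lhs : loopF (true :: fs) 0 = loopF fs 1 := by simp [loopF]
        rw [lhs, h1, pref3_cons, run3_cons]
        simp only [Bool.true_and, Bool.or_self_left]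

lemma all_not_any (w : List Char) : (w.all fun c => !pyIsDecimal c) = !(w.any pyIsDecimal) := by
  induction w with
  | nil => rfl
  | cons c w ih => simp [List.all_cons, List.any_cons, ih, Bool.not_or]

lemma solLoop_eq_loopF (ws : List (List Char)) (n : Int) :
    solLoop ws n = loopF (ws.map (fun w => !(w.any pyIsDecimal))) n := by
  induction ws generalizing n with
  | nil => rfl
  | cons w ws ih =>
    have hv : (w.all fun c => pyIsDecimal c == false) = !(w.any pyIsDecimal) := by
      rw [← all_not_any]; simp
    simp only [solLoop, loopF, List.map_cons, hv, ih]

-- ===== VERDICT (by name: the statement is the Claim_ definition above) =====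
theorem solution_spec : Claim_equal_solution := by
  intro text _
  show solution text = solution_alt text
  have halt : solution_alt text =
      run3 ((PySem.Chars.splitOn text.toList [' ']).map (fun w => !(w.any pyIsDecimal))) := by
    simp only [solution_alt]
    rw [PySem.List.slice_from_one, PySem.List.slice_from _ (by norm_num : (0:Int) ≤ 2)]
    simp [run3, List.drop_one]
  rw [halt]
  unfold solution
  rw [solLoop_eq_loopF, (loopF_run3 _).2.2, pref3_or_run3]
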